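-- pv_equiv track=rewrite | github.com/Street93/ml-lecture-2015-project | sanitize.py | no_short_sentences
-- ===== SOURCE A (Python) =====
-- def split_at(string, predicate):
--     substr_start = 0
--     i = 0
--     while i != len(string):
--         if(predicate(string[i])):
--             yield string[substr_start : i]
--             substr_start = i + 1
--         i += 1
--
--     yield string[substr_start : ]
--
-- def no_short_sentences(paragraph):
--     sentence_end_chars = ['.', '!', '?', ':']
--     sentences = list(split_at(paragraph, lambda c: c in sentence_end_chars))[ : -1]
--
--     for sentence in sentences:
--         words = sentence.split()
--         if len(words) < 2:
--             return False
--
--     return True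
-- ===== SOURCE B (Python) =====
-- def no_short_sentences(paragraph):
--     word_count = 0
--     in_word = False
--     for c in paragraph:
--         if c in '.!?:':
--             if word_count < 2:
--                 return False
--             word_count = 0
--             in_word = False
--         elif c.isspace():
--             in_word = False
--         elif not in_word:
--             word_count += 1
--             in_word = True
--     return True
-- ===== Notes on version B (the rewrite author's own statement) =====
-- stated objective: faster
-- what changed: Replaces the generator that materialises the list of sentence substrings and the per-sentence str.split() with a single stateful scan over the characters maintaining a word count and an in-word flag, closing a sentence at each end character.
import Mathlib
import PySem

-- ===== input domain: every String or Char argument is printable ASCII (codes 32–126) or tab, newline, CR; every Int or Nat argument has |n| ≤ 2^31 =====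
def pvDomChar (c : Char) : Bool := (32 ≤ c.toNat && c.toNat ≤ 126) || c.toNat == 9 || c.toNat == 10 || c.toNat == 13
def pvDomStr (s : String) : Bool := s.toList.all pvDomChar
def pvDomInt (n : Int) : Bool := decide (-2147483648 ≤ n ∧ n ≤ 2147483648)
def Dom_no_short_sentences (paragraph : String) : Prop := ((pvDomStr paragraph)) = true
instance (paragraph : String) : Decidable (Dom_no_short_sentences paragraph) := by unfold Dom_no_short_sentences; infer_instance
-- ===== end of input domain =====

-- B replaces A's materialised sentence-substring list + per-sentence str.split() by one
-- stateful scan keeping a word count and an in-word flag (objective: faster by constant factor).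

-- ===== PORT A =====
def pvSentenceEndChars : List Char := ['.', '!', '?', ':']

-- the while-loop of split_at: index i, substr_start, yields collected into the result list
def pvSplitAtGo (s : List Char) (substrStart i : Nat) : List (List Char) :=
  if h : i < s.length then
    if pvSentenceEndChars.contains s[i] then
      PySem.List.slice s (some (substrStart : Int)) (some (i : Int)) ::
        pvSplitAtGo s (i + 1) (i + 1)
    else
      pvSplitAtGo s substrStart (i + 1)
  else
    [PySem.List.slice s (some (substrStart : Int)) none]
termination_by s.length - i
decreasing_by all_goals omega

-- the for-loop over sentences with early return False
def pvCheckLoop : List (List Char) → Bool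
  | [] => true
  | sent :: rest =>
      if (PySem.Chars.split₀ sent).length < 2 then false else pvCheckLoop rest

def no_short_sentences (paragraph : String) : Bool :=
  pvCheckLoop (PySem.List.slice (pvSplitAtGo paragraph.toList 0 0) none (some (-1)))

-- ===== PORT B =====
def pvIsEnd (c : Char) : Bool := c == '.' || c == '!' || c == '?' || c == ':'

def pvScan : List Char → Nat → Bool → Bool
  | [], _, _ => true
  | c :: rest, wordCount, inWord =>
      if pvIsEnd c then
        if wordCount < 2 then false else pvScan rest 0 false
      else if PySem.Chars.isspace c then pvScan rest wordCount false
      else if !inWord then pvScan rest (wordCount + 1) true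
      else pvScan rest wordCount inWord

def no_short_sentences_alt (paragraph : String) : Bool :=
  pvScan paragraph.toList 0 false

-- ===== PRECONDITION & SPEC =====
def Spec_no_short_sentences (paragraph : String) (out : Bool) : Prop := out = no_short_sentences_alt paragraph
instance (paragraph : String) (out : Bool) : Decidable (Spec_no_short_sentences paragraph out) := by unfold Spec_no_short_sentences; infer_instance

-- ===== CLAIM (what is proved, stated in full; the proofs are below) =====
def Claim_equal_no_short_sentences : Prop := ∀ (paragraph : String), Dom_no_short_sentences paragraph → Spec_no_short_sentences paragraph (no_short_sentences paragraph)

-- ===== LEMMAS AND PROOFS =====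

-- pure structural split at end characters (always nonempty: last fragment is the trailing one)
def pvSplitPure : List Char → List (List Char)
  | [] => [[]]
  | c :: cs =>
      if pvIsEnd c then [] :: pvSplitPure cs
      else
        match pvSplitPure cs with
        | [] => [[c]]
        | f :: rest => (c :: f) :: rest

def pvConsHead (p : List Char) : List (List Char) → List (List Char)
  | [] => [p]
  | f :: rest => (p ++ f) :: rest

-- word count of a fragment starting in state inWord
def pvCW : List Char → Bool → Nat
  | [], _ => 0
  | c :: cs, inWord =>
      if PySem.Chars.isspace c then pvCW cs false
      else if inWord then pvCW cs true
      else 1 + pvCW cs true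

-- B's judgement, phrased on the fragment list
def pvCheckB : List (List Char) → Nat → Bool → Bool
  | [], _, _ => true
  | [_], _, _ => true
  | f :: rest, wc, inw =>
      if wc + pvCW f inw < 2 then false else pvCheckB rest 0 false

theorem pvSplitPure_ne_nil (cs : List Char) : pvSplitPure cs ≠ [] := by
  cases cs with
  | nil => simp [pvSplitPure]
  | cons c cs =>
      simp only [pvSplitPure]
      split
      · simp
      · cases h : pvSplitPure cs <;> simp

theorem pvContains_eq (c : Char) : pvSentenceEndChars.contains c = pvIsEnd c := by
  show (c == '.' || (c == '!' || (c == '?' || (c == ':' || false)))) = _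
  simp [pvIsEnd, Bool.or_assoc]

theorem pvSplit₀go_length (cs cur : List Char) (acc : List (List Char)) :
    (PySem.Chars.split₀.go cs cur acc).length
      = acc.length + (if cur.isEmpty then 0 else 1) + pvCW cs (!cur.isEmpty) := by
  induction cs generalizing cur acc with
  | nil =>
      cases cur <;> simp [PySem.Chars.split₀.go, pvCW]
  | cons c cs ih =>
      by_cases hs : PySem.Chars.isspace c = true
      · cases cur <;> simp [PySem.Chars.split₀.go, hs, pvCW, ih] <;> omega
      · cases cur <;> simp [PySem.Chars.split₀.go, hs, pvCW, ih] <;> omega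

theorem pvSplit₀_length (f : List Char) :
    (PySem.Chars.split₀ f).length = pvCW f false := by
  have := pvSplit₀go_length f [] []
  simpa [PySem.Chars.split₀] using this

theorem pvSplitAtGo_eq (s : List Char) (start i : Nat)
    (hsi : start ≤ i) (hil : i ≤ s.length) :
    pvSplitAtGo s start i
      = pvConsHead ((s.drop start).take (i - start)) (pvSplitPure (s.drop i)) := by
  by_cases h : i < s.length
  · have hdrop : s.drop i = s[i] :: s.drop (i + 1) := List.drop_eq_getElem_cons h
    rw [pvSplitAtGo]
    simp only [h, dif_pos, pvContains_eq]
    by_cases he : pvIsEnd s[i] = true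
    · rw [if_pos he]
      have ih := pvSplitAtGo_eq s (i + 1) (i + 1) (le_refl _) h
      rw [ih]
      cases hsp : pvSplitPure (s.drop (i + 1)) with
      | nil => exact absurd hsp (pvSplitPure_ne_nil _)
      | cons f rest =>
          rw [hdrop]
          simp [pvSplitPure, he, hsp, pvConsHead, PySem.List.slice_natCast]
    · rw [if_neg he]
      have ih := pvSplitAtGo_eq s start (i + 1) (by omega) h
      rw [ih, hdrop]
      cases hsp : pvSplitPure (s.drop (i + 1)) with
      | nil => exact absurd hsp (pvSplitPure_ne_nil _)
      | cons f rest =>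
          simp only [pvSplitPure, he, Bool.false_eq_true, if_neg, hsp, pvConsHead]
          have hget : (s.drop start)[i - start]? = some s[i] := by
            rw [List.getElem?_drop]
            have : start + (i - start) = i := by omega
            rw [this, List.getElem?_eq_getElem h]
          have htake : (s.drop start).take (i + 1 - start)
              = (s.drop start).take (i - start) ++ [s[i]] := by
            have : i + 1 - start = (i - start) + 1 := by omega
            rw [this, List.take_succ, hget]
            simp
          rw [htake]
          simp
  · have hieq : i = s.length := by omega
    rw [pvSplitAtGo]
    simp only [h, dif_neg, not_false_iff]
    subst hieq
    simp [pvSplitPure, pvConsHead, PySem.List.slice_from_natCast]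
termination_by s.length - i
decreasing_by all_goals omega

theorem pvScan_eq_checkB (cs : List Char) (wc : Nat) (inw : Bool) :
    pvScan cs wc inw = pvCheckB (pvSplitPure cs) wc inw := by
  induction cs generalizing wc inw with
  | nil => simp [pvScan, pvSplitPure, pvCheckB]
  | cons c cs ih =>
      by_cases he : pvIsEnd c = true
      · cases hsp : pvSplitPure cs with
        | nil => exact absurd hsp (pvSplitPure_ne_nil _)
        | cons f rest =>
            have hstep : pvSplitPure (c :: cs) = [] :: f :: rest := by
              simp [pvSplitPure, he, hsp]
            rw [hstep]
            have hL : pvScan (c :: cs) wc inw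
                = if wc < 2 then false else pvScan cs 0 false := by
              simp [pvScan, he]
            rw [hL, ih, hsp]
            simp [pvCheckB, pvCW]
      · cases hsp : pvSplitPure cs with
        | nil => exact absurd hsp (pvSplitPure_ne_nil _)
        | cons f rest =>
            have hstep : pvSplitPure (c :: cs) = (c :: f) :: rest := by
              simp [pvSplitPure, he, hsp]
            rw [hstep]
            by_cases hs : PySem.Chars.isspace c = true
            · have hL : pvScan (c :: cs) wc inw = pvScan cs wc false := by
                simp [pvScan, he, hs]
              rw [hL, ih, hsp]
              cases rest <;> simp [pvCheckB, pvCW, hs]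
            · cases inw with
              | true =>
                  have hL : pvScan (c :: cs) wc true = pvScan cs wc true := by
                    simp [pvScan, he, hs]
                  rw [hL, ih, hsp]
                  cases rest <;> simp [pvCheckB, pvCW, hs]
              | false =>
                  have hL : pvScan (c :: cs) wc false = pvScan cs (wc + 1) true := by
                    simp [pvScan, he, hs]
                  rw [hL, ih, hsp]
                  have hcw : wc + pvCW (c :: f) false = (wc + 1) + pvCW f true := by
                    simp [pvCW, hs]; omega
                  cases rest <;> simp [pvCheckB, hcw]

theorem pvCheckLoop_dropLast (l : List (List Char)) (hl : l ≠ []) :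
    pvCheckLoop l.dropLast = pvCheckB l 0 false := by
  induction l with
  | nil => exact absurd rfl hl
  | cons f rest ih =>
      cases rest with
      | nil => simp [pvCheckLoop, pvCheckB]
      | cons g more =>
          have hd : (f :: g :: more).dropLast = f :: (g :: more).dropLast := by
            simp [List.dropLast]
          rw [hd]
          simp only [pvCheckLoop, pvCheckB, pvSplit₀_length, Nat.zero_add]
          rw [ih (by simp)]

-- ===== VERDICT (by name: the statement is the Claim_ definition above) =====
theorem no_short_sentences_spec : Claim_equal_no_short_sentences := by
  intro paragraph _
  unfold Spec_no_short_sentences no_short_sentences no_short_sentences_alt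
  rw [PySem.List.slice_to_neg_one]
  rw [pvSplitAtGo_eq paragraph.toList 0 0 (le_refl _) (by omega)]
  cases hsp : pvSplitPure (paragraph.toList.drop 0) with
  | nil => exact absurd hsp (pvSplitPure_ne_nil _)
  | cons f rest =>
      simp only [List.drop_zero] at hsp
      rw [List.drop_zero] at *
      simp only [hsp, pvConsHead, Nat.sub_zero, List.take_zero, List.nil_append]
      rw [pvCheckLoop_dropLast (f :: rest) (by simp)]
      rw [pvScan_eq_checkB, hsp]
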